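-- pv_equiv track=rewrite | github.com/neper-stars/stars-decompile | scripts/extract_stars_messages.py | emit_c_array
-- ===== SOURCE A (Python) =====
-- from typing import Dict, Iterable, List, Optional, Tuple
--
-- def c_escape(s: str) -> str:
--     """Escape to a valid C string literal content (without surrounding quotes)."""
--     out: List[str] = []
--     for ch in s:
--         o = ord(ch)
--         if ch == '\\':
--             out.append('\\\\')
--         elif ch == '"':
--             out.append('\\"')
--         elif ch == '\n':
--             out.append('\\n')
--         elif ch == '\r':
--             out.append('\\r')
--         elif ch == '\t':
--             out.append('\\t')
--         elif 32 <= o <= 126: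
--             out.append(ch)
--         else:
--             out.append(f"\\x{o:02x}")
--     return ''.join(out)
--
-- def emit_c_array(strings: List[str], array_name: str) -> str:
--     lines: List[str] = []
--     lines.append(f"const char *const {array_name}[] = {{")
--     for i, s in enumerate(strings):
--         lines.append(f"    /* {i:4d} (0x{i:04x}) */ \"{c_escape(s)}\",")
--     lines.append("};")
--     lines.append("")
--     return "\n".join(lines)
-- ===== SOURCE B (Python) =====
-- import re
--
-- _ESC = {'\\': '\\\\', '"': '\\"', '\n': '\\n', '\r': '\\r', '\t': '\\t'}
-- _PAT = re.compile(r'[\\"\n\r\t]|[^\x20-\x7e]')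
--
--
-- def _repl(m):
--     c = m.group(0)
--     return _ESC.get(c) or f"\\x{ord(c):02x}"
--
--
-- def emit_c_array(strings, array_name):
--     body = "".join(
--         f'    /* {i:4d} (0x{i:04x}) */ "{_PAT.sub(_repl, s)}",\n'
--         for i, s in enumerate(strings)
--     )
--     return f"const char *const {array_name}[] = {{\n{body}}};\n"
-- ===== Notes on version B (the rewrite author's own statement) =====
-- stated objective: idiomatic
-- what changed: c_escape's per-character if/elif append loop is replaced by one precompiled regex substitution with a replacement-table callback (the engine leaves non-matching printable characters untouched), and emit_c_array's line-list accumulator plus '\n'.join is replaced by a single join over a generator of already-terminated lines inside one f-string.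
import Mathlib
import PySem

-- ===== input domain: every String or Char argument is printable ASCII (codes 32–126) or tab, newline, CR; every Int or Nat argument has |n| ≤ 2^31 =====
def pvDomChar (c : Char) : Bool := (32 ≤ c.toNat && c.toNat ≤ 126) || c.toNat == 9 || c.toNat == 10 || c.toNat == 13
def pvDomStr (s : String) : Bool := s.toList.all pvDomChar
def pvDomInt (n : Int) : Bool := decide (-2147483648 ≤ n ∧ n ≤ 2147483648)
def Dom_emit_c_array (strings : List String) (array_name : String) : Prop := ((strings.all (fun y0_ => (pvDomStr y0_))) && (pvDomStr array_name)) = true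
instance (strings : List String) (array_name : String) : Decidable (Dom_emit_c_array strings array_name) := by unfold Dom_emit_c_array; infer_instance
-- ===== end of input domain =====

-- B replaces A's per-character if/elif escaping loop by a single regex substitution with a
-- replacement-table callback, and builds the output by joining one comprehension instead of
-- accumulating a list of lines (objective: more idiomatic; same cost).

-- shared formatting helpers (both Pythons use the same f-string format specs)
-- f"{i:4d}" for i ≥ 0: decimal digits right-justified with spaces to width 4
def pvFmtD4 (i : Int) : List Char :=
  let d := PySem.Int.toChars i
  List.replicate (4 - d.length) ' ' ++ d
-- f"{n:0<w>x}": lowercase hex, zero-padded to width w (n : Nat; all uses are on non-negative values)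
def pvFmtX (w : Nat) (n : Nat) : List Char :=
  let d := Nat.toDigits 16 n
  List.replicate (w - d.length) '0' ++ d

-- ===== PORT A =====
-- literal port of c_escape: per-character if/elif chain appending pieces to a list, then ''.join
def c_escape (s : String) : String :=
  let out : List (List Char) := s.toList.foldl (fun out ch =>
    let o := ch.toNat
    if ch = '\\' then out ++ [['\\', '\\']]
    else if ch = '"' then out ++ [['\\', '"']]
    else if ch = '\n' then out ++ [['\\', 'n']]
    else if ch = '\r' then out ++ [['\\', 'r']]
    else if ch = '\t' then out ++ [['\\', 't']]
    else if 32 ≤ o ∧ o ≤ 126 then out ++ [[ch]]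
    else out ++ [['\\', 'x'] ++ pvFmtX 2 o]) []
  String.ofList (PySem.Chars.join [] out)

def emit_c_array (strings : List String) (array_name : String) : String :=
  let lines : List (List Char) :=
    [("const char *const ".toList ++ array_name.toList ++ "[] = {".toList)]
  let lines := (PySem.List.enumerate strings 0).foldl (fun lines is =>
    lines ++ ["    /* ".toList ++ pvFmtD4 is.1 ++ " (0x".toList ++ pvFmtX 4 is.1.toNat
              ++ ") */ \"".toList ++ (c_escape is.2).toList ++ "\",".toList]) lines
  let lines := lines ++ ["};".toList, []]
  String.ofList (PySem.Chars.join ['\n'] lines)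

-- ===== PORT B =====
-- the _ESC replacement table of Source B
def pvEsc : PySem.Dict Char (List Char) :=
  ((((PySem.Dict.empty.insert '\\' ['\\', '\\']).insert '"' ['\\', '"']).insert
      '\n' ['\\', 'n']).insert '\r' ['\\', 'r']).insert '\t' ['\\', 't']

-- the regex character class  [\\"\n\r\t]|[^\x20-\x7e]  (single-character matches)
def pvMatch (c : Char) : Bool :=
  c = '\\' || c = '"' || c = '\n' || c = '\r' || c = '\t' || !(32 ≤ c.toNat && c.toNat ≤ 126)

-- the _repl callback: table lookup, falling back to f"\\x{ord(c):02x}"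
def pvRepl (c : Char) : List Char :=
  match pvEsc.get? c with
  | some r => r
  | none => ['\\', 'x'] ++ pvFmtX 2 c.toNat

-- _PAT.sub(_repl, s): each matching character replaced, non-matches untouched
def pvSub (cs : List Char) : List Char :=
  cs.flatMap (fun c => if pvMatch c then pvRepl c else [c])

def emit_c_array_alt (strings : List String) (array_name : String) : String :=
  let body := PySem.Chars.join [] ((PySem.List.enumerate strings 0).map (fun is =>
    "    /* ".toList ++ pvFmtD4 is.1 ++ " (0x".toList ++ pvFmtX 4 is.1.toNat
      ++ ") */ \"".toList ++ pvSub is.2.toList ++ "\",\n".toList))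
  String.ofList ("const char *const ".toList ++ array_name.toList ++ "[] = {\n".toList
             ++ body ++ "};\n".toList)

-- ===== PRECONDITION & SPEC =====
def Spec_emit_c_array (strings : List String) (array_name : String) (out : String) : Prop := out = emit_c_array_alt strings array_name
instance (strings : List String) (array_name : String) (out : String) : Decidable (Spec_emit_c_array strings array_name out) := by unfold Spec_emit_c_array; infer_instance

-- ===== CLAIM (what is proved, stated in full; the proofs are below) =====
def Claim_equal_emit_c_array : Prop := ∀ (strings : List String) (array_name : String), Dom_emit_c_array strings array_name → Spec_emit_c_array strings array_name (emit_c_array strings array_name)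

-- ===== LEMMAS AND PROOFS =====

-- ''.join over pieces is concatenation
theorem pvJoinNil (xs : List (List Char)) : PySem.Chars.join [] xs = xs.flatten := by
  induction xs with
  | nil => simp [PySem.Chars.join_nil]
  | cons x xs ih =>
    cases xs with
    | nil => simp [PySem.Chars.join_singleton]
    | cons y rest => simp [PySem.Chars.join_cons_cons, ih]

-- A's per-character piece equals B's regex-substitution action on that character
theorem pvPieceEq (ch : Char) :
    (if ch = '\\' then ['\\', '\\']
     else if ch = '"' then ['\\', '"']
     else if ch = '\n' then ['\\', 'n']
     else if ch = '\r' then ['\\', 'r']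
     else if ch = '\t' then ['\\', 't']
     else if 32 ≤ ch.toNat ∧ ch.toNat ≤ 126 then [ch]
     else ['\\', 'x'] ++ pvFmtX 2 ch.toNat)
      = (if pvMatch ch then pvRepl ch else [ch]) := by
  by_cases h1 : ch = '\\'
  · subst h1; decide
  by_cases h2 : ch = '"'
  · subst h2; decide
  by_cases h3 : ch = '\n'
  · subst h3; decide
  by_cases h4 : ch = '\r'
  · subst h4; decide
  by_cases h5 : ch = '\t'
  · subst h5; decide
  have hget : pvEsc.get? ch = none := by
    unfold pvEsc
    rw [PySem.Dict.get?_insert_of_ne _ _ h5, PySem.Dict.get?_insert_of_ne _ _ h4,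
        PySem.Dict.get?_insert_of_ne _ _ h3, PySem.Dict.get?_insert_of_ne _ _ h2,
        PySem.Dict.get?_insert_of_ne _ _ h1]
    rfl
  by_cases h6 : 32 ≤ ch.toNat ∧ ch.toNat ≤ 126
  · simp [h1, h2, h3, h4, h5, h6, pvMatch]
  · have : ¬ (32 ≤ ch.toNat && ch.toNat ≤ 126) = true := by
      simpa [decide_eq_true_eq] using h6
    simp [h1, h2, h3, h4, h5, h6, pvMatch, this, pvRepl, hget]

-- c_escape agrees with the regex substitution, character by character
theorem pvEscapeEq (s : String) : (c_escape s).toList = pvSub s.toList := by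
  unfold c_escape pvSub
  have hf : s.toList.foldl (fun out ch =>
      if ch = '\\' then out ++ [['\\', '\\']]
      else if ch = '"' then out ++ [['\\', '"']]
      else if ch = '\n' then out ++ [['\\', 'n']]
      else if ch = '\r' then out ++ [['\\', 'r']]
      else if ch = '\t' then out ++ [['\\', 't']]
      else if 32 ≤ ch.toNat ∧ ch.toNat ≤ 126 then out ++ [[ch]]
      else out ++ [['\\', 'x'] ++ pvFmtX 2 ch.toNat]) ([] : List (List Char))
      = s.toList.map (fun ch => if pvMatch ch then pvRepl ch else [ch]) := by
    have hfun : (fun (out : List (List Char)) ch =>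
        if ch = '\\' then out ++ [['\\', '\\']]
        else if ch = '"' then out ++ [['\\', '"']]
        else if ch = '\n' then out ++ [['\\', 'n']]
        else if ch = '\r' then out ++ [['\\', 'r']]
        else if ch = '\t' then out ++ [['\\', 't']]
        else if 32 ≤ ch.toNat ∧ ch.toNat ≤ 126 then out ++ [[ch]]
        else out ++ [['\\', 'x'] ++ pvFmtX 2 ch.toNat])
        = fun out ch => out ++ [if pvMatch ch then pvRepl ch else [ch]] := by
      funext out ch
      rw [← pvPieceEq ch]
      split_ifs <;> rfl
    rw [hfun, PySem.List.foldl_append_singleton_eq_map, List.nil_append]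
  dsimp only
  simp only [hf, pvJoinNil]
  simp [List.flatMap_def, String.toList_ofList]

-- "\n".join of header :: item-lines ++ ["};", ""] in closed form
theorem pvJoinShape (xs : List (List Char)) (h cl : List Char) :
    PySem.Chars.join ['\n'] (h :: (xs ++ [cl, []]))
      = h ++ '\n' :: ((xs.map (· ++ ['\n'])).flatten ++ (cl ++ ['\n'])) := by
  induction xs generalizing h with
  | nil => simp [PySem.Chars.join_cons_cons, PySem.Chars.join_singleton]
  | cons x rest ih =>
    simp only [List.cons_append, PySem.Chars.join_cons_cons, ih x]
    simp

-- ===== VERDICT (by name: the statement is the Claim_ definition above) =====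
theorem emit_c_array_spec : Claim_equal_emit_c_array := by
  intro strings array_name _
  unfold Spec_emit_c_array emit_c_array emit_c_array_alt
  dsimp only
  rw [PySem.List.foldl_append_singleton_eq_map
    (fun is : Int × String => "    /* ".toList ++ pvFmtD4 is.1 ++ " (0x".toList ++ pvFmtX 4 is.1.toNat
      ++ ") */ \"".toList ++ (c_escape is.2).toList ++ "\",".toList)]
  rw [List.singleton_append, List.cons_append, pvJoinShape, pvJoinNil]
  apply congrArg
  rw [List.map_map]
  have hmap : List.map ((fun x => x ++ ['\n']) ∘ (fun is : Int × String =>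
      "    /* ".toList ++ pvFmtD4 is.1 ++ " (0x".toList ++ pvFmtX 4 is.1.toNat
        ++ ") */ \"".toList ++ (c_escape is.2).toList ++ "\",".toList)) (PySem.List.enumerate strings)
      = List.map (fun is : Int × String =>
      "    /* ".toList ++ pvFmtD4 is.1 ++ " (0x".toList ++ pvFmtX 4 is.1.toNat
        ++ ") */ \"".toList ++ pvSub is.2.toList ++ "\",\n".toList) (PySem.List.enumerate strings) := by
    apply List.map_congr_left
    intro is _
    have e4 : "\",\n".toList = "\",".toList ++ ['\n'] := by decide
    simp [Function.comp, pvEscapeEq is.2, e4]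
  rw [hmap]
  have e1 : "[] = {\n".toList = "[] = {".toList ++ ['\n'] := by decide
  have e2 : "};\n".toList = "};".toList ++ ['\n'] := by decide
  simp [e1, e2]
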